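-- pv_equiv track=rewrite | github.com/vickyli1014/TeamLabsPortfolio | Fundamentals of Programming/lab4/lab.py | dict_of_surrounding_cells
-- ===== SOURCE A (Python) =====
-- def dict_of_surrounding_cells(dim_num, coord, dimensions):
--     '''
--     Creates a dictionary with the key as the dimension layer number and its values
--     as the coordinates of the surrounding cells in that dimension
--
--     Typically the last key, value pair is most useful
--
--     Parameters:
--         dim_num (int): the dimension number we are currently trying to find the
--             surrounding coordinates for
--
--         coord (tuple): the coordinate that we want to get the surrounding coordinates
--             from
--
--         dimensions (tuple): the dimensions of the board
--
--     Returns: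
--         A dictionary with the key as the dimension layer number and its values as
--         the coordinates of the surrounding cells in that dimension
--
--     >>> dict_of_surrounding_cells(3, (2, 1, 2), (2, 4, 2))
--     {1: [[1]], 2: [[1, 0], [1, 1], [1, 2]], 3: [[1, 0, 1], [1, 1, 1], [1, 2, 1]]}
--
--     dict_of_surrounding_cells(4, ())
--     {1: [[0], [1], [2]], 2: [[0, 1], [1, 1], [2, 1]], 3: [[0, 1, 2], [0, 1, 3],
--     [0, 1, 4], [1, 1, 2], [1, 1, 3], [1, 1, 4], [2, 1, 2], [2, 1, 3], [2, 1, 4]],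
--     4: [[0, 1, 2, 0], [0, 1, 2, 1], [0, 1, 3, 0], [0, 1, 3, 1], [0, 1, 4, 0],
--     [0, 1, 4, 1], [1, 1, 2, 0], [1, 1, 2, 1], [1, 1, 3, 0], [1, 1, 3, 1], [1, 1, 4, 0],
--     [1, 1, 4, 1], [2, 1, 2, 0], [2, 1, 2, 1], [2, 1, 3, 0], [2, 1, 3, 1], [2, 1, 4, 0], [2, 1, 4, 1]]}
--     '''
--     # if last dimension, return a dictionary with key = 1, values = surrounding cells in 1D
--     if dim_num == 1:
--         return {dim_num: [ [coord[0]+i] for i in range(-1, 2) if 0 <= coord[0]+i < dimensions[dim_num-1] ]}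
--     cells_in_prev_dim = dict_of_surrounding_cells(dim_num - 1, coord, dimensions)[dim_num-1]
--     cells_in_this_dim = []
--     # add surrounding cells from the new dimension
--     # i.e. [0, 0] -> [0, 0, 0] [0, 0, 1] [0, 0, 2]
--     new_plane = []
--     for plane in cells_in_prev_dim:
--         for i in range(-1, 2):
--             # append to list if within range of board
--             new_coord = coord[dim_num-1] + i
--             if 0 <= new_coord < dimensions[dim_num-1]:
--                 new_plane.append(plane + [coord[dim_num-1] + i])
--     all_coords_so_far = dict_of_surrounding_cells(dim_num - 1, coord, dimensions)
--     all_coords_so_far[dim_num] = new_plane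
--     return all_coords_so_far
-- ===== SOURCE B (Python) =====
-- def dict_of_surrounding_cells(dim_num, coord, dimensions):
--     # Iterative bottom-up build: layer 1 first, then each next layer from the previous one.
--     layer = [[coord[0] + i] for i in range(-1, 2) if 0 <= coord[0] + i < dimensions[0]]
--     result = {1: layer}
--     for d in range(2, dim_num + 1):
--         layer = [plane + [coord[d - 1] + i]
--                  for plane in layer
--                  for i in range(-1, 2)
--                  if 0 <= coord[d - 1] + i < dimensions[d - 1]]
--         result[d] = layer
--     return result
-- ===== Notes on version B (the rewrite author's own statement) =====
-- stated objective: alternative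
-- what changed: Replaced the doubled recursive descent (A calls itself twice per level) with a single iterative bottom-up loop that builds each layer from the previous one while accumulating the dict.
import Mathlib
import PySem

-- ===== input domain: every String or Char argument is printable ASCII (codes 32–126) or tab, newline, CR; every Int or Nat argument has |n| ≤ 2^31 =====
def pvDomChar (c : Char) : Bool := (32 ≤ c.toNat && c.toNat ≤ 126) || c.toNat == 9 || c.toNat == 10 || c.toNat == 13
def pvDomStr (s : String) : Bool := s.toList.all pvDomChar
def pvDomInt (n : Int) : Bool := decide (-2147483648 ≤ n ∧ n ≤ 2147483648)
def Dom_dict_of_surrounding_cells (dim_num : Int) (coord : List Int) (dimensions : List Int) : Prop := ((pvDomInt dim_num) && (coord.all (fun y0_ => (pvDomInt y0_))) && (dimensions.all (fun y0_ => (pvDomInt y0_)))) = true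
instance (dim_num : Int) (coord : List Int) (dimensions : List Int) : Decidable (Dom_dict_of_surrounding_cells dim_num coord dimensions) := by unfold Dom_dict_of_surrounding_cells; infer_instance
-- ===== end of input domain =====

-- B replaces A's doubled recursion with one iterative bottom-up loop (alternative decomposition, same outputs).

-- ===== PORT A =====
-- literal port of A's recursion; the 'else Dict.empty' arm is only the totality guard
-- for dim_num ≤ 0, where the Python recurses forever (RecursionError) — outside Pre_.
def pyA_dsc (dim_num : Int) (coord : List Int) (dimensions : List Int) :
    PySem.Dict Int (List (List Int)) :=
  if dim_num = 1 then
    PySem.Dict.empty.insert dim_num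
      ((PySem.List.pyRange (-1) 2 1).foldl (fun acc i =>
        if 0 ≤ PySem.List.pyGetD coord 0 0 + i ∧
            PySem.List.pyGetD coord 0 0 + i < PySem.List.pyGetD dimensions (dim_num - 1) 0 then
          acc ++ [[PySem.List.pyGetD coord 0 0 + i]]
        else acc) [])
  else if 1 < dim_num then
    let cells_in_prev_dim :=
      (pyA_dsc (dim_num - 1) coord dimensions).getD (dim_num - 1) []
    let new_plane :=
      cells_in_prev_dim.foldl (fun np plane =>
        (PySem.List.pyRange (-1) 2 1).foldl (fun np i =>
          let new_coord := PySem.List.pyGetD coord (dim_num - 1) 0 + i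
          if 0 ≤ new_coord ∧ new_coord < PySem.List.pyGetD dimensions (dim_num - 1) 0 then
            np ++ [plane ++ [PySem.List.pyGetD coord (dim_num - 1) 0 + i]]
          else np) np) []
    let all_coords_so_far := pyA_dsc (dim_num - 1) coord dimensions
    all_coords_so_far.insert dim_num new_plane
  else PySem.Dict.empty
termination_by dim_num.toNat
decreasing_by all_goals omega

def dict_of_surrounding_cells (dim_num : Int) (coord : List Int) (dimensions : List Int) : List (Int × List (List Int)) :=
  (pyA_dsc dim_num coord dimensions).items

-- ===== PORT B =====
def dict_of_surrounding_cells_alt (dim_num : Int) (coord : List Int) (dimensions : List Int) : List (Int × List (List Int)) :=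
  let layer0 :=
    (PySem.List.pyRange (-1) 2 1).foldl (fun acc i =>
      if 0 ≤ PySem.List.pyGetD coord 0 0 + i ∧
          PySem.List.pyGetD coord 0 0 + i < PySem.List.pyGetD dimensions 0 0 then
        acc ++ [[PySem.List.pyGetD coord 0 0 + i]]
      else acc) []
  let st :=
    (PySem.List.pyRange 2 (dim_num + 1) 1).foldl
      (fun (st : PySem.Dict Int (List (List Int)) × List (List Int)) d =>
        let layer :=
          st.2.foldl (fun acc plane =>
            (PySem.List.pyRange (-1) 2 1).foldl (fun acc i =>
              if 0 ≤ PySem.List.pyGetD coord (d - 1) 0 + i ∧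
                  PySem.List.pyGetD coord (d - 1) 0 + i < PySem.List.pyGetD dimensions (d - 1) 0 then
                acc ++ [plane ++ [PySem.List.pyGetD coord (d - 1) 0 + i]]
              else acc) acc) []
        (st.1.insert d layer, layer))
      (PySem.Dict.empty.insert 1 layer0, layer0)
  st.1.items

-- ===== PRECONDITION & SPEC =====
-- Pre_ is exactly the set of inputs on which the Python A returns: dim_num ≥ 1, both lists
-- nonempty, and either dim_num many entries exist in both lists, or some earlier position j
-- produces an empty layer (no neighbour of coord[j] fits in [0, dimensions[j])), after which
-- no further index is touched. Outside Pre_ A raises (RecursionError or IndexError).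
def Pre_dict_of_surrounding_cells (dim_num : Int) (coord : List Int) (dimensions : List Int) : Prop :=
  1 ≤ dim_num ∧ coord ≠ [] ∧ dimensions ≠ [] ∧
  ((dim_num ≤ coord.length ∧ dim_num ≤ dimensions.length) ∨
   ∃ j < min coord.length dimensions.length, (j : Int) < dim_num - 1 ∧
     ¬(-1 ≤ coord.getD j 0 ∧ coord.getD j 0 ≤ dimensions.getD j 0 ∧ 1 ≤ dimensions.getD j 0))
instance (dim_num : Int) (coord : List Int) (dimensions : List Int) : Decidable (Pre_dict_of_surrounding_cells dim_num coord dimensions) := by unfold Pre_dict_of_surrounding_cells; infer_instance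

def pvWitness_dict_of_surrounding_cells : Int × List Int × List Int := (3, [2, 1, 2], [2, 4, 2])

def Spec_dict_of_surrounding_cells (dim_num : Int) (coord : List Int) (dimensions : List Int) (out : List (Int × List (List Int))) : Prop := out = dict_of_surrounding_cells_alt dim_num coord dimensions
instance (dim_num : Int) (coord : List Int) (dimensions : List Int) (out : List (Int × List (List Int))) : Decidable (Spec_dict_of_surrounding_cells dim_num coord dimensions out) := by unfold Spec_dict_of_surrounding_cells; infer_instance

-- ===== CLAIM (what is proved, stated in full; the proofs are below) =====
def Claim_equal_dict_of_surrounding_cells : Prop := ∀ (dim_num : Int) (coord : List Int) (dimensions : List Int), Dom_dict_of_surrounding_cells dim_num coord dimensions → Pre_dict_of_surrounding_cells dim_num coord dimensions → Spec_dict_of_surrounding_cells dim_num coord dimensions (dict_of_surrounding_cells dim_num coord dimensions)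

-- ===== LEMMAS AND PROOFS =====

-- shared shapes of the two loop bodies
def dscBase (coord dimensions : List Int) : List (List Int) :=
  (PySem.List.pyRange (-1) 2 1).foldl (fun acc i =>
    if 0 ≤ PySem.List.pyGetD coord 0 0 + i ∧
        PySem.List.pyGetD coord 0 0 + i < PySem.List.pyGetD dimensions 0 0 then
      acc ++ [[PySem.List.pyGetD coord 0 0 + i]]
    else acc) []

def dscStep (coord dimensions : List Int) (d : Int) (L : List (List Int)) : List (List Int) :=
  L.foldl (fun acc plane =>
    (PySem.List.pyRange (-1) 2 1).foldl (fun acc i =>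
      if 0 ≤ PySem.List.pyGetD coord (d - 1) 0 + i ∧
          PySem.List.pyGetD coord (d - 1) 0 + i < PySem.List.pyGetD dimensions (d - 1) 0 then
        acc ++ [plane ++ [PySem.List.pyGetD coord (d - 1) 0 + i]]
      else acc) acc) []

-- the layer of dimension k+1 and the dict of layers 1..k+1, as one forward recursion
def dscLayer (coord dimensions : List Int) : Nat → List (List Int)
  | 0 => dscBase coord dimensions
  | k + 1 => dscStep coord dimensions ((k : Int) + 2) (dscLayer coord dimensions k)

def dscDict (coord dimensions : List Int) : Nat → PySem.Dict Int (List (List Int))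
  | 0 => PySem.Dict.empty.insert 1 (dscBase coord dimensions)
  | k + 1 => (dscDict coord dimensions k).insert ((k : Int) + 2) (dscLayer coord dimensions (k + 1))

theorem dscDict_getD_last (coord dimensions : List Int) (k : Nat) :
    (dscDict coord dimensions k).getD ((k : Int) + 1) [] = dscLayer coord dimensions k := by
  cases k with
  | zero => simp [dscDict, dscLayer, PySem.Dict.getD_insert_self]
  | succ m =>
      show ((dscDict coord dimensions m).insert ((m : Int) + 2) _).getD ((m : Int) + 1 + 1) [] = _
      rw [show ((m : Int) + 1 + 1) = (m : Int) + 2 by ring, PySem.Dict.getD_insert_self]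

theorem pyA_eq_dscDict (coord dimensions : List Int) (k : Nat) :
    pyA_dsc ((k : Int) + 1) coord dimensions = dscDict coord dimensions k := by
  induction k with
  | zero =>
      rw [pyA_dsc]
      norm_num [dscDict, dscBase]
  | succ m ih =>
      rw [pyA_dsc]
      push_cast
      rw [if_neg (by omega : ¬ ((m : Int) + 1 + 1 = 1)), if_pos (by omega : (1 : Int) < (m : Int) + 1 + 1)]
      rw [show ((m : Int) + 1 + 1) - 1 = (m : Int) + 1 by ring, ih, dscDict_getD_last,
        show ((m : Int) + 1 + 1) = (m : Int) + 2 by ring]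
      have hm : ((m : Int) + 2) - 1 = (m : Int) + 1 := by ring
      simp only [dscDict, dscLayer, dscStep, hm]

theorem alt_fold_eq (coord dimensions : List Int) (k : Nat) :
    (PySem.List.pyRange 2 ((k : Int) + 2) 1).foldl
      (fun (st : PySem.Dict Int (List (List Int)) × List (List Int)) d =>
        let layer :=
          st.2.foldl (fun acc plane =>
            (PySem.List.pyRange (-1) 2 1).foldl (fun acc i =>
              if 0 ≤ PySem.List.pyGetD coord (d - 1) 0 + i ∧
                  PySem.List.pyGetD coord (d - 1) 0 + i < PySem.List.pyGetD dimensions (d - 1) 0 then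
                acc ++ [plane ++ [PySem.List.pyGetD coord (d - 1) 0 + i]]
              else acc) acc) []
        (st.1.insert d layer, layer))
      (PySem.Dict.empty.insert 1 (dscBase coord dimensions), dscBase coord dimensions)
    = (dscDict coord dimensions k, dscLayer coord dimensions k) := by
  induction k with
  | zero =>
      rw [show ((0 : Nat) : Int) + 2 = 2 by norm_num,
        PySem.List.pyRange_one_eq_nil (a := 2) (le_refl 2)]
      rfl
  | succ m ih =>
      rw [show (((m + 1 : Nat)) : Int) + 2 = ((m : Int) + 2) + 1 by push_cast; ring,
        PySem.List.pyRange_one_succ_right (by omega), List.foldl_append, ih]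
      rfl

theorem dsc_both_eq (dim_num : Int) (coord dimensions : List Int) (h : 1 ≤ dim_num) :
    dict_of_surrounding_cells dim_num coord dimensions
      = dict_of_surrounding_cells_alt dim_num coord dimensions := by
  obtain ⟨k, hk⟩ : ∃ k : Nat, dim_num = (k : Int) + 1 :=
    ⟨(dim_num - 1).toNat, by omega⟩
  subst hk
  show (pyA_dsc ((k : Int) + 1) coord dimensions).items = _
  rw [pyA_eq_dscDict]
  simp only [dict_of_surrounding_cells_alt]
  rw [show ((k : Int) + 1 + 1) = (k : Int) + 2 by ring]
  rw [show
    ((PySem.List.pyRange (-1) 2 1).foldl (fun acc i =>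
      if 0 ≤ PySem.List.pyGetD coord 0 0 + i ∧
          PySem.List.pyGetD coord 0 0 + i < PySem.List.pyGetD dimensions 0 0 then
        acc ++ [[PySem.List.pyGetD coord 0 0 + i]]
      else acc) []) = dscBase coord dimensions from rfl]
  rw [alt_fold_eq]

-- ===== VERDICT (by name: the statement is the Claim_ definition above) =====
theorem dict_of_surrounding_cells_spec : Claim_equal_dict_of_surrounding_cells := by
  intro dim_num coord dimensions _ hpre
  unfold Spec_dict_of_surrounding_cells
  exact dsc_both_eq dim_num coord dimensions hpre.1
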